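-- pv_equiv track=rewrite | github.com/Barbariansyah/pyjudge | test/arithmetic_seq/arithmetic_seq_4.py | arithmetic_seq_4
-- ===== SOURCE A (Python) =====
-- def arithmetic_seq_4(n):
--     if n < 1:
--         return 1
--     ret = 0
--     i = 1
--     while i <= n:
--         ret += i
--         i += 1
--         if i == 8:
--             break
--     return ret
-- ===== SOURCE B (Python) =====
-- def arithmetic_seq_4(n):
--     if n < 1:
--         return 1
--     k = min(7, int(n))
--     return k * (k + 1) // 2
-- ===== Notes on version B (the rewrite author's own statement) =====
-- stated objective: simpler
-- what changed: Replaces the capped accumulation while-loop with the closed-form triangular number k*(k+1)//2 where k = min(7, n), keeping the n < 1 early return.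
import Mathlib
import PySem

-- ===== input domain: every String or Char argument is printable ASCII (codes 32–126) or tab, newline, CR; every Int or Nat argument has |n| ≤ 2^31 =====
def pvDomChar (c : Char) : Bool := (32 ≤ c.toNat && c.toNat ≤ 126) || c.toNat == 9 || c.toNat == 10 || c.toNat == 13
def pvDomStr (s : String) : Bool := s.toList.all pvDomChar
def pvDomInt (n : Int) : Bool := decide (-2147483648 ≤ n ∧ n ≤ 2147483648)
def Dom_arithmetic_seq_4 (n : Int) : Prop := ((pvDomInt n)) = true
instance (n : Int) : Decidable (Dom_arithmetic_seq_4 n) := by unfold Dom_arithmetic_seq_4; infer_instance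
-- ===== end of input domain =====

-- B replaces A's capped accumulation loop with the closed-form triangular number (simpler).


-- ===== PORT A =====
-- the while loop; it runs at most 7 iterations (breaks when i reaches 8), fuel 8 suffices
def arithmetic_seq_4_loop : Nat → Int → Int → Int → Int
  | 0, ret, _, _ => ret
  | fuel + 1, ret, i, n =>
    if i ≤ n then
      let ret' := ret + i
      let i' := i + 1
      if i' == 8 then ret' else arithmetic_seq_4_loop fuel ret' i' n
    else ret

def arithmetic_seq_4 (n : Int) : Int :=
  if n < 1 then 1
  else arithmetic_seq_4_loop 8 0 1 n

-- ===== PORT B =====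
def arithmetic_seq_4_alt (n : Int) : Int :=
  if n < 1 then 1
  else
    let k := min 7 n
    PySem.Int.floordiv (k * (k + 1)) 2

-- ===== PRECONDITION & SPEC =====
def Spec_arithmetic_seq_4 (n : Int) (out : Int) : Prop := out = arithmetic_seq_4_alt n
instance (n : Int) (out : Int) : Decidable (Spec_arithmetic_seq_4 n out) := by unfold Spec_arithmetic_seq_4; infer_instance

-- ===== CLAIM (what is proved, stated in full; the proofs are below) =====
def Claim_equal_arithmetic_seq_4 : Prop := ∀ (n : Int), Dom_arithmetic_seq_4 n → Spec_arithmetic_seq_4 n (arithmetic_seq_4 n)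

-- ===== LEMMAS AND PROOFS =====
set_option maxHeartbeats 1000000 in
theorem arithmetic_seq_4_big (n : Int) (h : 7 ≤ n) : arithmetic_seq_4 n = 28 := by
  have h1 : ¬ n < 1 := by omega
  have c1 : (1:Int) ≤ n := by omega
  have c2 : (2:Int) ≤ n := by omega
  have c3 : (3:Int) ≤ n := by omega
  have c4 : (4:Int) ≤ n := by omega
  have c5 : (5:Int) ≤ n := by omega
  have c6 : (6:Int) ≤ n := by omega
  have c7 : (7:Int) ≤ n := by omega
  simp only [arithmetic_seq_4, arithmetic_seq_4_loop, if_neg h1, if_pos c1]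
  simp [c2, c3, c4, c5, c6, c7]

theorem arithmetic_seq_4_alt_big (n : Int) (h : 7 ≤ n) : arithmetic_seq_4_alt n = 28 := by
  have h1 : ¬ n < 1 := by omega
  have hm : min 7 n = 7 := by omega
  simp [arithmetic_seq_4_alt, if_neg h1, hm, PySem.Int.floordiv]

-- ===== VERDICT (by name: the statement is the Claim_ definition above) =====
theorem arithmetic_seq_4_spec : Claim_equal_arithmetic_seq_4 := by
  intro n _
  unfold Spec_arithmetic_seq_4
  by_cases hlt : n < 1
  · simp [arithmetic_seq_4, arithmetic_seq_4_alt, hlt]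
  · by_cases h7 : 7 ≤ n
    · rw [arithmetic_seq_4_big n h7, arithmetic_seq_4_alt_big n h7]
    · interval_cases n <;> decide
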